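-- pv_equiv track=rewrite | github.com/pypi-data/pypi-mirror-237 | packages/hak/hak-0.0.203.tar.gz/hak-0.0.203/hak/string/nest_level/get.py | f
-- ===== SOURCE A (Python) =====
-- def f(x):
--   result = []
--   nest_level = 0
--   for c in x:
--     if c == '{':
--       result.append(nest_level)
--       nest_level += 1
--     elif c == '}':
--       nest_level -= 1
--       result.append(nest_level)
--     else:
--       result.append(nest_level)
--   return result
-- ===== SOURCE B (Python) =====
-- def f(x):
--   levels = [0]
--   for c in x:
--     levels.append(levels[-1] + (c == '{') - (c == '}'))
--   return [levels[i + 1] if c == '}' else levels[i] for i, c in enumerate(x)]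
-- ===== Notes on version B (the rewrite author's own statement) =====
-- stated objective: alternative
-- what changed: Replaces A's single stateful accumulator loop with a two-phase decomposition: build a prefix-sum level table (levels[i] = nest level before char i), then an indexed pass over enumerate(x) that reads levels[i+1] for '}' and levels[i] otherwise.
import Mathlib
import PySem

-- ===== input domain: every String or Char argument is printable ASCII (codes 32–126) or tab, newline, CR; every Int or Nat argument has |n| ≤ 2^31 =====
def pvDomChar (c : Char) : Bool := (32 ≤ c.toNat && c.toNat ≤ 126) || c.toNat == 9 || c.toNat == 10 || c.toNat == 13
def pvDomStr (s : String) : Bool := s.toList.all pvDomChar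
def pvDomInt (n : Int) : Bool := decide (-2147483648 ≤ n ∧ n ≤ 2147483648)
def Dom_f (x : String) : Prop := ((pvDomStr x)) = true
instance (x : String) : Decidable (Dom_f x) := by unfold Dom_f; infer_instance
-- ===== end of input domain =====

-- B replaces A's single stateful-accumulator loop by a prefix-level table plus an indexed pass (alternative decomposition, same cost).

-- ===== PORT A =====
-- literal port of A's loop: state is (result, nest_level)
def f (x : String) : List Int :=
  (x.toList.foldl (fun (st : List Int × Int) c =>
     if c = '{' then (st.1 ++ [st.2], st.2 + 1)
     else if c = '}' then (st.1 ++ [st.2 - 1], st.2 - 1)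
     else (st.1 ++ [st.2], st.2)) ([], 0)).1

-- ===== PORT B =====
-- levels[-1] → pyGetD lv (-1); bool arithmetic (c=='{') - (c=='}') → if-expressions;
-- levels[i] / levels[i+1] → pyGetD (indices produced by enumerate are always in range)
def f_alt (x : String) : List Int :=
  let levels := x.toList.foldl (fun lv c =>
     lv ++ [PySem.List.pyGetD lv (-1) 0 +
            ((if c = '{' then (1 : Int) else 0) - (if c = '}' then (1 : Int) else 0))]) [0]
  (PySem.List.enumerate x.toList 0).map (fun p =>
     if p.2 = '}' then PySem.List.pyGetD levels (p.1 + 1) 0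
     else PySem.List.pyGetD levels p.1 0)

-- ===== PRECONDITION & SPEC =====
def Spec_f (x : String) (out : List Int) : Prop := out = f_alt x
instance (x : String) (out : List Int) : Decidable (Spec_f x out) := by unfold Spec_f; infer_instance

-- ===== CLAIM (what is proved, stated in full; the proofs are below) =====
def Claim_equal_f : Prop := ∀ (x : String), Dom_f x → Spec_f x (f x)

-- ===== LEMMAS AND PROOFS =====

-- per-character level delta
def pvD (c : Char) : Int := (if c = '{' then 1 else 0) - (if c = '}' then 1 else 0)

-- common characterization of both programs' output
def pvCore : List Char → Int → List Int
  | [], _ => []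
  | c :: cs, n => (if c = '}' then n + pvD c else n) :: pvCore cs (n + pvD c)

lemma pvA_core (cs : List Char) (res : List Int) (n : Int) :
    (cs.foldl (fun (st : List Int × Int) c =>
       if c = '{' then (st.1 ++ [st.2], st.2 + 1)
       else if c = '}' then (st.1 ++ [st.2 - 1], st.2 - 1)
       else (st.1 ++ [st.2], st.2)) (res, n)).1 = res ++ pvCore cs n := by
  induction cs generalizing res n with
  | nil => simp [pvCore]
  | cons c cs ih =>
    by_cases h1 : c = '{'
    · simp [h1, List.foldl_cons, ih, pvCore, pvD]
    · by_cases h2 : c = '}'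
      · simp [h2, List.foldl_cons, ih, pvCore, pvD]
        ring_nf
        simp
      · simp [h1, h2, List.foldl_cons, ih, pvCore, pvD]

lemma pvLevels_scanl (cs : List Char) (pre : List Int) (n : Int) :
    cs.foldl (fun lv c =>
       lv ++ [PySem.List.pyGetD lv (-1) 0 +
              ((if c = '{' then (1 : Int) else 0) - (if c = '}' then (1 : Int) else 0))])
      (pre ++ [n]) = pre ++ List.scanl (fun a c => a + pvD c) n cs := by
  induction cs generalizing pre n with
  | nil => simp [List.scanl]
  | cons c cs ih =>
    have hlast : PySem.List.pyGetD (pre ++ [n]) (-1) 0 = n :=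
      PySem.List.pyGetD_neg_one_append_singleton pre n 0
    simp only [List.foldl_cons, hlast, List.scanl]
    have := ih (pre ++ [n]) (n + pvD c)
    simpa [pvD, List.append_assoc] using this

lemma pvB_core (cs : List Char) (L : List Int) (n : Int) (s : ℕ)
    (h : L.drop s = List.scanl (fun a c => a + pvD c) n cs) :
    (PySem.List.enumerate cs (s : Int)).map (fun p =>
       if p.2 = '}' then PySem.List.pyGetD L (p.1 + 1) 0
       else PySem.List.pyGetD L p.1 0) = pvCore cs n := by
  induction cs generalizing n s with
  | nil => simp [PySem.List.enumerate_nil, pvCore]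
  | cons c cs ih =>
    have hscanl : List.scanl (fun a c => a + pvD c) n (c :: cs)
        = n :: List.scanl (fun a c => a + pvD c) (n + pvD c) cs := by
      simp [List.scanl]
    rw [hscanl] at h
    have hgetS : L[s]? = some n := by
      have : (L.drop s)[0]? = some n := by rw [h]; simp
      simpa using this
    have hdrop1 : L.drop (s + 1) = List.scanl (fun a c => a + pvD c) (n + pvD c) cs := by
      have : (L.drop s).tail = List.scanl (fun a c => a + pvD c) (n + pvD c) cs := by
        rw [h]; simp
      simpa [List.tail_drop] using this
    have hgetSD : L.getD s 0 = n := by simp [List.getD_eq_getElem?_getD, hgetS]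
    have hgetS1 : L.getD (s + 1) 0 = n + pvD c := by
      rcases Nat.lt_or_ge (s + 1) L.length with hlt | hge
      · have h0 : (L.drop (s + 1))[0]? = some (n + pvD c) := by rw [hdrop1]; simp
        have h1 : L[s + 1]? = some (n + pvD c) := by simpa using h0
        simp [List.getD_eq_getElem?_getD, h1]
      · exfalso
        have hlen : (L.drop (s + 1)).length = 0 := by simp; omega
        rw [hdrop1] at hlen; simp at hlen
    have ihx := ih (n + pvD c) (s + 1) hdrop1
    have hcast : ((s : Int) + 1) = ((s + 1 : ℕ) : Int) := by push_cast; ring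
    rw [PySem.List.enumerate_cons, List.map_cons, hcast, ihx,
        show pvCore (c :: cs) n = (if c = '}' then n + pvD c else n) :: pvCore cs (n + pvD c)
          from by simp [pvCore]]
    congr 1
    by_cases hc : c = '}'
    · rw [if_pos hc, if_pos hc, PySem.List.pyGetD_natCast]; exact hgetS1
    · rw [if_neg hc, if_neg hc, PySem.List.pyGetD_natCast]; exact hgetSD

-- ===== VERDICT (by name: the statement is the Claim_ definition above) =====
theorem f_spec : Claim_equal_f := by
  intro x _
  unfold Spec_f f f_alt
  have hA := pvA_core x.toList [] 0
  have hL := pvLevels_scanl x.toList [] 0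
  simp only [List.nil_append] at hA hL
  rw [hA, hL]
  have hB := pvB_core x.toList (List.scanl (fun a c => a + pvD c) 0 x.toList) 0 0 (by simp)
  simpa using hB.symm
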